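-- pv_equiv track=rewrite | github.com/arguelloj/CFB-study | CFB- LHEB/Chapter 3/Exercises 3/orf.py | restOfORF
-- ===== SOURCE A (Python) =====
-- def restOfORF(DNA):
--     ''' This helper function called
--     restOfORF(DNA) will read in a
--     sequence of DNA nucleotides from the
--     coding strand, and returns the
--     corresponding amino acids as a string.
--     Do not worry about start and stop codons. '''
--     outputORFstring = ""; #Data curation string for DNA seq
--     for char in range(0, len(DNA), 3):
--         if DNA[char:char+3] in ['TAG', 'TAA', 'TGA']:
--             return(outputORFstring); #Return ORF up to Stop Codon
--         else:
--             outputORFstring = outputORFstring + DNA[char:char+3]; #Prep of output ORF string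
--     return(outputORFstring);
-- ===== SOURCE B (Python) =====
-- def restOfORF(DNA):
--     # Different decomposition: build the codon list once, locate the first stop
--     # codon's frame index, and return one slice of the original DNA.
--     codons = [DNA[i:i+3] for i in range(0, len(DNA), 3)]
--     end = next((j for j, c in enumerate(codons) if c in ('TAG', 'TAA', 'TGA')), len(codons))
--     return DNA[:3 * end]
-- ===== Notes on version B (the rewrite author's own statement) =====
-- stated objective: simpler
-- what changed: B replaces A's growing accumulator string with a codon-list comprehension plus a first-stop index search, returning a single slice DNA[:3*end] of the original string.
import Mathlib
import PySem

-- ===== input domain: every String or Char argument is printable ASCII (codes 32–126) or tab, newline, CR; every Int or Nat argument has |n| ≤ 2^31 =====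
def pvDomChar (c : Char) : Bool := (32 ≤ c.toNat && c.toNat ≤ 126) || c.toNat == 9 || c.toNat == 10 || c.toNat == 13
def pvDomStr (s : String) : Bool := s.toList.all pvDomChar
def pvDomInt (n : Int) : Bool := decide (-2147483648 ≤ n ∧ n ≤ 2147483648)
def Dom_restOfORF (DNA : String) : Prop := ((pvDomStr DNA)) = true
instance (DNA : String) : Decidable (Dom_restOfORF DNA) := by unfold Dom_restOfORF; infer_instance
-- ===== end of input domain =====

-- B builds the codon list once and returns a single slice of DNA up to the first
-- stop codon, instead of A's accumulator string grown codon by codon (objective: simpler).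

-- ===== PORT A =====
-- loop `for char in range(0, len(DNA), 3)` with early return, accumulator string
def restOfORF_go (s : List Char) (idxs : List Int) (acc : List Char) : List Char :=
  match idxs with
  | [] => acc
  | i :: rest =>
    if PySem.List.slice s (some i) (some (i + 3)) ∈
        ["TAG".toList, "TAA".toList, "TGA".toList] then
      acc
    else
      restOfORF_go s rest (acc ++ PySem.List.slice s (some i) (some (i + 3)))

def restOfORF (DNA : String) : String :=
  String.mk (restOfORF_go DNA.toList (PySem.List.pyRange 0 (DNA.toList.length : Int) 3) [])

-- ===== PORT B =====
-- `next((j for j, c in enumerate(codons) if c in stops), len(codons))` is exactly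
-- List.findIdx: first index whose codon is a stop, or the length if none.
def restOfORF_alt (DNA : String) : String :=
  let s := DNA.toList
  let codons := (PySem.List.pyRange 0 (s.length : Int) 3).map
      (fun i => PySem.List.slice s (some i) (some (i + 3)))
  let e := codons.findIdx
      (fun c => c ∈ ["TAG".toList, "TAA".toList, "TGA".toList])
  String.mk (PySem.List.slice s none (some (3 * (e : Int))))

-- ===== PRECONDITION & SPEC =====
def Spec_restOfORF (DNA : String) (out : String) : Prop := out = restOfORF_alt DNA
instance (DNA : String) (out : String) : Decidable (Spec_restOfORF DNA out) := by unfold Spec_restOfORF; infer_instance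

-- ===== CLAIM (what is proved, stated in full; the proofs are below) =====
def Claim_equal_restOfORF : Prop := ∀ (DNA : String), Dom_restOfORF DNA → Spec_restOfORF DNA (restOfORF DNA)

-- ===== LEMMAS AND PROOFS =====

-- spec-level stop test and chunked recursion, used only by the proofs
def pvIsStop (c : List Char) : Bool :=
  c ∈ ["TAG".toList, "TAA".toList, "TGA".toList]

def pvChop (s : List Char) : List Char :=
  if h : s = [] then []
  else if pvIsStop (s.take 3) then []
  else s.take 3 ++ pvChop (s.drop 3)
termination_by s.length
decreasing_by
  have : 0 < s.length := List.length_pos_of_ne_nil h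
  simp [List.length_drop]; omega

def pvChunks (s : List Char) : List (List Char) :=
  if h : s = [] then []
  else s.take 3 :: pvChunks (s.drop 3)
termination_by s.length
decreasing_by
  have : 0 < s.length := List.length_pos_of_ne_nil h
  simp [List.length_drop]; omega

lemma pvRange3_nil (a b : Int) (h : b ≤ a) : PySem.List.pyRange a b 3 = [] := by
  rw [PySem.List.pyRange_of_pos a b (by norm_num)]
  simp [if_neg (not_lt.mpr h)]

lemma pvRange3_cons (a b : Int) (h : a < b) :
    PySem.List.pyRange a b 3 = a :: PySem.List.pyRange (a + 3) b 3 := by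
  rw [PySem.List.pyRange_of_pos a b (by norm_num),
      PySem.List.pyRange_of_pos (a + 3) b (by norm_num)]
  have hcnt : ((b - a + 3 - 1) / 3).toNat =
      (if a + 3 < b then ((b - (a + 3) + 3 - 1) / 3).toNat else 0) + 1 := by
    split_ifs with h' <;> omega
  rw [if_pos h, hcnt, List.range_succ_eq_map, List.map_cons, List.map_map]
  refine congrArg₂ List.cons (by simp) ?_
  apply List.map_congr_left
  intro k _
  simp [Function.comp]
  push_cast
  ring

-- A's loop from index a with accumulator acc computes acc ++ pvChop (s.drop a)
lemma pvGo_eq (s : List Char) :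
    ∀ (fuel : Nat) (a : Nat), s.length ≤ a + fuel → ∀ acc,
      restOfORF_go s (PySem.List.pyRange (a : Int) (s.length : Int) 3) acc
        = acc ++ pvChop (s.drop a) := by
  intro fuel
  induction fuel with
  | zero =>
    intro a ha acc
    rw [pvRange3_nil _ _ (by exact_mod_cast ha)]
    rw [List.drop_eq_nil_of_le (by omega), pvChop]
    simp [restOfORF_go]
  | succ m ih =>
    intro a ha acc
    by_cases hab : s.length ≤ a
    · rw [pvRange3_nil _ _ (by exact_mod_cast hab)]
      rw [List.drop_eq_nil_of_le hab, pvChop]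
      simp [restOfORF_go]
    · push_neg at hab
      rw [pvRange3_cons _ _ (by exact_mod_cast hab)]
      have hslice : PySem.List.slice s (some (a : Int)) (some ((a : Int) + 3))
          = (s.drop a).take 3 := by
        have := PySem.List.slice_natCast_add (xs := s) (j := a) (n := 3)
        exact_mod_cast this
      have hdrop_ne : s.drop a ≠ [] := by
        intro hnil
        have := List.drop_eq_nil_iff.mp hnil
        omega
      rw [restOfORF_go, hslice]
      rw [pvChop]
      rw [dif_neg hdrop_ne]
      have hbool : pvIsStop ((s.drop a).take 3) = true ↔
          (s.drop a).take 3 ∈ ["TAG".toList, "TAA".toList, "TGA".toList] := by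
        unfold pvIsStop; exact decide_eq_true_iff
      by_cases hstop : (s.drop a).take 3 ∈ ["TAG".toList, "TAA".toList, "TGA".toList]
      · rw [if_pos hstop, if_pos (hbool.mpr hstop)]
        simp
      · rw [if_neg hstop, if_neg (fun hh => hstop (hbool.mp hh))]
        have hcast : ((a : Int) + 3) = ((a + 3 : Nat) : Int) := by push_cast; ring
        rw [hcast, ih (a + 3) (by omega) (acc ++ (s.drop a).take 3)]
        simp [List.drop_drop, List.append_assoc]

-- B's codon comprehension, read from frame index a, equals the chunk list of s.drop a
lemma pvCodons_eq (s : List Char) :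
    ∀ (fuel : Nat) (a : Nat), s.length ≤ a + fuel →
      ((PySem.List.pyRange (a : Int) (s.length : Int) 3).map
        (fun i => PySem.List.slice s (some i) (some (i + 3)))) = pvChunks (s.drop a) := by
  intro fuel
  induction fuel with
  | zero =>
    intro a ha
    rw [pvRange3_nil _ _ (by exact_mod_cast ha)]
    rw [List.drop_eq_nil_of_le (by omega), pvChunks]
    simp
  | succ m ih =>
    intro a ha
    by_cases hab : s.length ≤ a
    · rw [pvRange3_nil _ _ (by exact_mod_cast hab)]
      rw [List.drop_eq_nil_of_le hab, pvChunks]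
      simp
    · push_neg at hab
      rw [pvRange3_cons _ _ (by exact_mod_cast hab), List.map_cons]
      have hslice : PySem.List.slice s (some (a : Int)) (some ((a : Int) + 3))
          = (s.drop a).take 3 := by
        have := PySem.List.slice_natCast_add (xs := s) (j := a) (n := 3)
        exact_mod_cast this
      have hdrop_ne : s.drop a ≠ [] := by
        intro hnil
        have := List.drop_eq_nil_iff.mp hnil
        omega
      have hcast : ((a : Int) + 3) = ((a + 3 : Nat) : Int) := by push_cast; ring
      rw [hslice, hcast, ih (a + 3) (by omega)]
      conv_rhs => rw [pvChunks]
      rw [dif_neg hdrop_ne, List.drop_drop]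

-- take (3 * first-stop index of the chunk list) equals pvChop
lemma pvTake_findIdx :
    ∀ (fuel : Nat) (s : List Char), s.length ≤ fuel →
      s.take (3 * (pvChunks s).findIdx
        (fun c => c ∈ ["TAG".toList, "TAA".toList, "TGA".toList])) = pvChop s := by
  intro fuel
  induction fuel with
  | zero =>
    intro s hs
    have : s = [] := List.eq_nil_of_length_eq_zero (by omega)
    subst this
    rw [pvChunks, pvChop]
    simp
  | succ m ih =>
    intro s hs
    by_cases hnil : s = []
    · subst hnil
      rw [pvChunks, pvChop]
      simp
    · rw [pvChunks, dif_neg hnil, pvChop, dif_neg hnil, List.findIdx_cons]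
      by_cases hstop : pvIsStop (s.take 3) = true
      · have : (decide (s.take 3 ∈ ["TAG".toList, "TAA".toList, "TGA".toList])) = true := hstop
        rw [if_pos hstop, this]
        simp
      · have : (decide (s.take 3 ∈ ["TAG".toList, "TAA".toList, "TGA".toList])) = false := by
          simpa [pvIsStop] using hstop
        rw [if_neg hstop, this]
        have hlen : (s.drop 3).length ≤ m := by
          have : 0 < s.length := List.length_pos_of_ne_nil hnil
          simp [List.length_drop]; omega
        have harith : 3 * ((pvChunks (s.drop 3)).findIdx
            (fun c => c ∈ ["TAG".toList, "TAA".toList, "TGA".toList]) + 1)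
            = 3 + 3 * ((pvChunks (s.drop 3)).findIdx
            (fun c => c ∈ ["TAG".toList, "TAA".toList, "TGA".toList])) := by ring
        simp only [Bool.cond_false]
        rw [harith, List.take_add, ih (s.drop 3) hlen]

-- ===== VERDICT (by name: the statement is the Claim_ definition above) =====
theorem restOfORF_spec : Claim_equal_restOfORF := by
  intro DNA _
  unfold Spec_restOfORF restOfORF restOfORF_alt
  set s := DNA.toList with hs
  have h0 := pvGo_eq s s.length 0 (by omega) []
  rw [Nat.cast_zero, List.drop_zero] at h0
  have h1 := pvCodons_eq s s.length 0 (by omega)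
  rw [Nat.cast_zero, List.drop_zero] at h1
  rw [h0]
  show String.mk (pvChop s) = String.mk (PySem.List.slice s none (some (3 *
    ((((PySem.List.pyRange 0 (s.length : Int) 3).map
        (fun i => PySem.List.slice s (some i) (some (i + 3)))).findIdx
      (fun c => c ∈ ["TAG".toList, "TAA".toList, "TGA".toList]) : Nat) : Int))))
  rw [h1]
  have hcast : (3 * (((pvChunks s).findIdx
      (fun c => c ∈ ["TAG".toList, "TAA".toList, "TGA".toList]) : Nat) : Int))
      = ((3 * ((pvChunks s).findIdx
      (fun c => c ∈ ["TAG".toList, "TAA".toList, "TGA".toList])) : Nat) : Int) := by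
    push_cast; ring
  rw [hcast, PySem.List.slice_to_natCast]
  rw [pvTake_findIdx s.length s (le_refl _)]
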